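-- pv_equiv track=rewrite | github.com/Pritz69/LeetCode-Solutions | 2509-minimize-xor/2509-minimize-xor.py | addSetBits
-- ===== SOURCE A (Python) =====
-- def addSetBits(number, bitsToAdd):
--     bitPosition = 0
--     while bitsToAdd > 0:
--         while (number >> bitPosition) & 1 == 1:
--             bitPosition += 1
--         number = number | (1 << bitPosition)
--         bitsToAdd -= 1
--     return number
-- ===== SOURCE B (Python) =====
-- def addSetBits(number, bitsToAdd):
--     for _ in range(bitsToAdd):
--         number |= number + 1
--     return number
-- ===== Notes on version B (the rewrite author's own statement) =====
-- stated objective: simpler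
-- what changed: Replaces A's persistent bit-position pointer and inner while-scan for the lowest zero bit by the bit identity n | (n+1), which sets the lowest zero bit directly, so B is a single plain loop with no inner scan and no bitPosition state.
-- outside the precondition, e.g. on addSetBits(-2, 1): A returns -1, B returns -1; on addSetBits(-1, 1): A does not finish within the time limit, B returns -1
import Mathlib
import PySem

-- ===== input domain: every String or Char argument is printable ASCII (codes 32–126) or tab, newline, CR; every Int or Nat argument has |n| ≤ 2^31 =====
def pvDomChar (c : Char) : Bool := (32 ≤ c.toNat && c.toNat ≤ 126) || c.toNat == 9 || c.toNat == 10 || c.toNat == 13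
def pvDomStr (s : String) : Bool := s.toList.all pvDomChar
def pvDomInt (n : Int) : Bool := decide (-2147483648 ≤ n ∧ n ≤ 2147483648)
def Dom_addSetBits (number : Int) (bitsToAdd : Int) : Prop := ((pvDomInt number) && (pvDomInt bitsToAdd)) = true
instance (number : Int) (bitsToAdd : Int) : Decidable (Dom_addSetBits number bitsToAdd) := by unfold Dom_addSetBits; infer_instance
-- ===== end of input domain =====

-- B replaces A's inner bit-position scan by the identity n | (n+1), which sets the lowest
-- zero bit directly (objective: simpler).

-- ===== PORT A =====
-- Inner 'while (number >> bitPosition) & 1 == 1' loop; bitPosition starts at 0 and is only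
-- incremented, so it is kept as a Nat.  The scan has no a-priori bound (for negative number
-- it never stops), so it carries fuel; on Pre_ the fuel 64 + bitsToAdd.toNat chosen below is
-- proved sufficient, so the port computes exactly what A computes there.
def addSetBitsScan (fuel : Nat) (number : Int) (p : Nat) : Nat :=
  match fuel with
  | 0 => p
  | f + 1 => if PySem.Int.band (number >>> p) 1 == 1 then addSetBitsScan f number (p + 1) else p

-- Outer 'while bitsToAdd > 0' loop, one recursive call per decrement of bitsToAdd.
def addSetBitsLoop (bits : Nat) (fuel : Nat) (number : Int) (p : Nat) : Int :=
  match bits with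
  | 0 => number
  | b + 1 =>
    let z := addSetBitsScan fuel number p
    addSetBitsLoop b fuel (PySem.Int.bor number ((1 : Int) <<< z)) z

def addSetBits (number : Int) (bitsToAdd : Int) : Int :=
  addSetBitsLoop bitsToAdd.toNat (64 + bitsToAdd.toNat) number 0

-- ===== PORT B =====
-- 'for _ in range(bitsToAdd): number |= number + 1'
def addSetBitsAltLoop (bits : Nat) (number : Int) : Int :=
  match bits with
  | 0 => number
  | b + 1 => addSetBitsAltLoop b (PySem.Int.bor number (number + 1))

def addSetBits_alt (number : Int) (bitsToAdd : Int) : Int :=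
  addSetBitsAltLoop bitsToAdd.toNat number

-- ===== PRECONDITION & SPEC =====
-- Pre_ excludes negative number together with bitsToAdd > 0: there A's inner scan can run
-- forever (e.g. number = -1 has no zero bit), so A diverges on part of that region; B still
-- returns (and agrees with A where A happens to terminate, e.g. (-2, 1) ↦ -1 for both).
def Pre_addSetBits (number : Int) (bitsToAdd : Int) : Prop :=
  0 ≤ number ∨ bitsToAdd ≤ 0
instance (number : Int) (bitsToAdd : Int) : Decidable (Pre_addSetBits number bitsToAdd) := by
  unfold Pre_addSetBits; infer_instance

def pvWitness_addSetBits : Int × Int := (5, 2)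

def Spec_addSetBits (number : Int) (bitsToAdd : Int) (out : Int) : Prop := out = addSetBits_alt number bitsToAdd
instance (number : Int) (bitsToAdd : Int) (out : Int) : Decidable (Spec_addSetBits number bitsToAdd out) := by unfold Spec_addSetBits; infer_instance

-- ===== CLAIM (what is proved, stated in full; the proofs are below) =====
def Claim_equal_addSetBits : Prop := ∀ (number : Int) (bitsToAdd : Int), Dom_addSetBits number bitsToAdd → Pre_addSetBits number bitsToAdd → Spec_addSetBits number bitsToAdd (addSetBits number bitsToAdd)

-- ===== LEMMAS AND PROOFS =====

lemma exists_zero_bit (n : Nat) : ∃ i, n.testBit i = false :=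
  ⟨n, Nat.testBit_lt_two_pow Nat.lt_two_pow_self⟩

-- the least zero bit of n
def lzero (n : Nat) : Nat := Nat.find (exists_zero_bit n)

lemma lzero_spec (n : Nat) : n.testBit (lzero n) = false := Nat.find_spec (exists_zero_bit n)

lemma lzero_min (n : Nat) {i : Nat} (h : i < lzero n) : n.testBit i = true := by
  simpa using Nat.find_min (exists_zero_bit n) h

-- bits below lzero n are all ones, bit (lzero n) is zero
lemma low_mod (n : Nat) : n % 2 ^ (lzero n + 1) = 2 ^ (lzero n) - 1 := by
  apply Nat.eq_of_testBit_eq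
  intro i
  rw [Nat.testBit_mod_two_pow, Nat.testBit_two_pow_sub_one]
  rcases lt_trichotomy i (lzero n) with h | h | h
  · simp [h, Nat.lt_succ_of_lt h, lzero_min n h]
  · simp [h, lzero_spec n]
  · simp [show ¬ i < lzero n + 1 by omega, show ¬ i < lzero n by omega]

-- testBit table shared by the next two lemmas
lemma low_or_bits (z i : Nat) :
    ((2 ^ z - 1).testBit i || (2 ^ z).testBit i) = (2 ^ (z + 1) - 1).testBit i := by
  rw [Nat.testBit_two_pow_sub_one, Nat.testBit_two_pow_sub_one]
  rcases lt_trichotomy i z with h | h | h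
  · simp [h, Nat.lt_succ_of_lt h, Nat.testBit_two_pow_of_ne (by omega : z ≠ i)]
  · simp [h, Nat.testBit_two_pow_self]
  · simp [show ¬ i < z + 1 by omega, show ¬ i < z by omega,
      Nat.testBit_two_pow_of_ne (by omega : z ≠ i)]

-- or-ing two numbers block by block
lemma or_core (q1 q2 z a b c : Nat) (ha : a < 2 ^ (z + 1)) (hb : b < 2 ^ (z + 1))
    (hc : c < 2 ^ (z + 1)) (h : ∀ i, (a.testBit i || b.testBit i) = c.testBit i) :
    (2 ^ (z + 1) * q1 + a) ||| (2 ^ (z + 1) * q2 + b) = 2 ^ (z + 1) * (q1 ||| q2) + c := by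
  apply Nat.eq_of_testBit_eq
  intro i
  rw [Nat.testBit_or, Nat.testBit_two_pow_mul_add q1 ha, Nat.testBit_two_pow_mul_add q2 hb,
    Nat.testBit_two_pow_mul_add (q1 ||| q2) hc]
  by_cases hi : i < z + 1
  · simp [hi, h i]
  · simp [hi, Nat.testBit_or]

-- B's step: if the bits of n below z are ones and bit z is zero, n | (n+1) = n + 2^z
lemma or_succ (n z : Nat) (h : n % 2 ^ (z + 1) = 2 ^ z - 1) : n ||| (n + 1) = n + 2 ^ z := by
  have h1 : 0 < 2 ^ z := Nat.two_pow_pos z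
  have h2 : 2 ^ z < 2 ^ (z + 1) := Nat.pow_lt_pow_succ (by norm_num)
  obtain ⟨q, hq⟩ : ∃ q, n = 2 ^ (z + 1) * q + (2 ^ z - 1) :=
    ⟨n / 2 ^ (z + 1), by conv_lhs => rw [← Nat.div_add_mod n (2 ^ (z + 1)), h]⟩
  subst hq
  have hcore := or_core q q z (2 ^ z - 1) (2 ^ z) (2 ^ (z + 1) - 1)
    (by omega) h2 (by omega) (low_or_bits z)
  rw [Nat.or_self] at hcore
  rw [(by omega : 2 ^ (z + 1) * q + (2 ^ z - 1) + 1 = 2 ^ (z + 1) * q + 2 ^ z), hcore]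
  omega

-- A's step: under the same hypothesis, n | 2^z = n + 2^z
lemma or_two_pow (n z : Nat) (h : n % 2 ^ (z + 1) = 2 ^ z - 1) : n ||| 2 ^ z = n + 2 ^ z := by
  have h1 : 0 < 2 ^ z := Nat.two_pow_pos z
  have h2 : 2 ^ z < 2 ^ (z + 1) := Nat.pow_lt_pow_succ (by norm_num)
  obtain ⟨q, hq⟩ : ∃ q, n = 2 ^ (z + 1) * q + (2 ^ z - 1) :=
    ⟨n / 2 ^ (z + 1), by conv_lhs => rw [← Nat.div_add_mod n (2 ^ (z + 1)), h]⟩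
  subst hq
  have hcore := or_core q 0 z (2 ^ z - 1) (2 ^ z) (2 ^ (z + 1) - 1)
    (by omega) h2 (by omega) (low_or_bits z)
  rw [Nat.mul_zero, Nat.zero_add, Nat.or_zero] at hcore
  rw [hcore]
  omega

-- the condition of A's inner while, over a nonnegative number
lemma scan_cond (n p : Nat) :
    (PySem.Int.band ((n : Int) >>> p) 1 == 1) = n.testBit p := by
  have hsr : ((n : Int) >>> p) = ((n >>> p : Nat) : Int) := by exact_mod_cast rfl
  have hb : PySem.Int.band ((n >>> p : Nat) : Int) 1 = (((n >>> p) &&& 1 : Nat) : Int) := by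
    exact_mod_cast PySem.Int.band_natCast (n >>> p) 1
  have key : (n >>> p) &&& 1 = if n.testBit p then 1 else 0 := by
    rw [Nat.and_one_is_mod, Nat.shiftRight_eq_div_pow, Nat.testBit_eq_decide_div_mod_eq]
    by_cases hc : n / 2 ^ p % 2 = 1
    · simp [hc]
    · simp [hc]; omega
  rw [hsr, hb, key]
  cases htb : n.testBit p <;> simp

-- A's inner scan finds the first zero bit at or above p
lemma scan_finds (fuel : Nat) (n : Nat) (p z : Nat) (hpz : p ≤ z) (hfuel : z - p < fuel)
    (hones : ∀ i, p ≤ i → i < z → n.testBit i = true) (hzz : n.testBit z = false) :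
    addSetBitsScan fuel (n : Int) p = z := by
  induction fuel generalizing p with
  | zero => omega
  | succ f ih =>
    rw [addSetBitsScan, scan_cond]
    by_cases hb : n.testBit p = true
    · have hne : p ≠ z := fun h => by rw [h] at hb; simp [hzz] at hb
      rw [hb, if_pos rfl]
      exact ih (p + 1) (by omega) (by omega) (fun i h1 h2 => hones i (by omega) h2)
    · have hpz' : p = z := by
        rcases Nat.lt_or_ge p z with h | h
        · exact absurd (hones p le_rfl h) hb
        · omega
      have hb' : n.testBit p = false := by simpa using hb
      rw [hb']
      simp [hpz']

-- both loops, run over a nonnegative number, coincide (the fuel F is large enough)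
lemma loops_eq (bits : Nat) : ∀ (n p F : Nat), (∀ i, i < p → n.testBit i = true) →
    bits ≤ F → n + 1 ≤ 2 ^ (F - bits) →
    addSetBitsLoop bits F (n : Int) p = addSetBitsAltLoop bits (n : Int) := by
  induction bits with
  | zero => intro n p F _ _ _; rfl
  | succ b ih =>
    intro n p F hp hbF hsz
    have hzf : n.testBit (lzero n) = false := lzero_spec n
    have hmod := low_mod n
    have h1 : 0 < 2 ^ (lzero n) := Nat.two_pow_pos (lzero n)
    have h2 : 2 ^ (lzero n) < 2 ^ (lzero n + 1) := Nat.pow_lt_pow_succ (by norm_num)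
    have hpz : p ≤ lzero n := by
      by_contra h
      rw [hp (lzero n) (by omega)] at hzf; simp at hzf
    have hlow : 2 ^ (lzero n) - 1 ≤ n := by
      have := Nat.mod_le n (2 ^ (lzero n + 1)); omega
    have hzlt : lzero n < F := by
      have hA : 2 ^ (lzero n) ≤ 2 ^ (F - (b + 1)) := by omega
      have hB : lzero n ≤ F - (b + 1) := (Nat.pow_le_pow_iff_right (by norm_num)).mp hA
      omega
    rw [addSetBitsLoop, addSetBitsAltLoop]
    rw [scan_finds F n p (lzero n) hpz (by omega) (fun i h1 h2 => lzero_min n h2) hzf]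
    have hstepA : PySem.Int.bor (n : Int) ((1 : Int) <<< lzero n)
        = ((n + 2 ^ (lzero n) : Nat) : Int) := by
      have hc : ((1 : Int) <<< lzero n) = ((1 <<< lzero n : Nat) : Int) := by exact_mod_cast rfl
      rw [hc, PySem.Int.bor_natCast, Nat.shiftLeft_eq, one_mul, or_two_pow n (lzero n) hmod]
    have hstepB : PySem.Int.bor (n : Int) ((n : Int) + 1)
        = ((n + 2 ^ (lzero n) : Nat) : Int) := by
      have hc : ((n : Int) + 1) = ((n + 1 : Nat) : Int) := by push_cast; ring
      rw [hc, PySem.Int.bor_natCast, or_succ n (lzero n) hmod]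
    rw [hstepA, hstepB]
    obtain ⟨q, hq⟩ : ∃ q, n = 2 ^ (lzero n + 1) * q + (2 ^ (lzero n) - 1) :=
      ⟨n / 2 ^ (lzero n + 1), by conv_lhs => rw [← Nat.div_add_mod n (2 ^ (lzero n + 1)), hmod]⟩
    apply ih (n + 2 ^ (lzero n)) (lzero n) F
    · intro i hi
      rw [(by omega : n + 2 ^ (lzero n) = 2 ^ (lzero n + 1) * q + (2 ^ (lzero n + 1) - 1)),
        Nat.testBit_two_pow_mul_add _ (by omega), if_pos (by omega),
        Nat.testBit_two_pow_sub_one]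
      simp [show i < lzero n + 1 by omega]
    · omega
    · have hFb : F - b = (F - (b + 1)) + 1 := by omega
      rw [hFb, pow_succ]
      omega

-- ===== VERDICT (by name: the statement is the Claim_ definition above) =====
theorem addSetBits_spec : Claim_equal_addSetBits := by
  intro number bitsToAdd hdom hpre
  unfold Spec_addSetBits addSetBits addSetBits_alt
  rcases hpre with hnn | hle
  · obtain ⟨n, rfl⟩ := Int.eq_ofNat_of_zero_le hnn
    apply loops_eq
    · intro i h; omega
    · omega
    · have hn : n ≤ 2147483648 := by
        unfold Dom_addSetBits pvDomInt at hdom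
        simp at hdom
        exact_mod_cast hdom.1
      have hpow : (2147483649 : Nat) ≤ 2 ^ (64 + bitsToAdd.toNat - bitsToAdd.toNat) := by
        calc (2147483649 : Nat) ≤ 2 ^ 64 := by norm_num
          _ ≤ 2 ^ (64 + bitsToAdd.toNat - bitsToAdd.toNat) :=
              Nat.pow_le_pow_right (by norm_num) (by omega)
      omega
  · rw [Int.toNat_of_nonpos hle]; rfl
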